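-- pv_equiv track=rewrite | github.com/tom38110/projet_Scrabble | prog.py | meilleur_mot
-- ===== SOURCE A (Python) =====
-- def mot_jouable(mot,ll):
--     lltemp = list(ll) # création d'une liste temporaire pour ne pas modifier l'original qui est la main du joueur
--     possible = len(mot) <= len(ll) # vérifie que le mot est plus court que le nombre de jetons dans la main
--     nbe = 0 # initialisation du nombre d'erreur
--     for i in range(len(mot)): # boucle qui vérifie si chaque lettre du mot est dans la liste
--         possible = possible and mot[i] in lltemp
--         if mot[i] in lltemp: # si oui enlève la lettre en question dans la liste temporaire pour pas qu'elle soit réutilisée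
--             lltemp.remove(mot[i])
--         elif mot[i] not in lltemp: # si la lettre n'est pas dans la liste temporaire augmente le nombre d'erreur
--             nbe = nbe + 1
--     if nbe <= ll.count('?'): # si le nombre d'erreur est inférieur ou égal au nombre de joker dans la main du joueur alors le mot est jouable
--         possible = True and len(mot) <= len(ll) # on revérifie si le mot est plus court que la longueur de la main du joueur
--     return possible
--
-- def mots_jouables(motsfr,ll):
--     motsjouables = []
--     for e in motsfr: # e prend successivement la valeur de chaque mot dans la liste des mots jouables
--         if mot_jouable(e, ll): # si le mot est bien jouable à partir de la main du joueur on l'ajoute à la liste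
--             motsjouables.append(e)
--     return motsjouables
--
-- def valeur_mot(mot,dico):
--     val = 0
--     if len(mot) == 7: # si le mot a une longueur de 7 lettre rajoute direct 50 points
--         val = 50
--     for e in mot: # e prend successivement chaque lettre du mot
--         val = val + dico[e]['val'] # on rajoute la valeur de la lettre à la somme des valeurs de chaque lettre
--     return val
--
-- def meilleur_mot(motsfr,ll,dico):
--     result = ""
--     valmeilleurmot = 0
--     motsjouables = mots_jouables(motsfr, ll) # on récupère la liste des mots jouables
--     for mot in motsjouables: # on parcours chaque mot de cette liste
--         valmot = valeur_mot(mot, dico)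
--         if valmot > valmeilleurmot: # on vérifie si la valeur du mot est supérieur à celle du meilleur mot actuel
--             result = mot
--             valmeilleurmot = valmot
--     return result # si il n'y a aucun mot on renvoie une chaîne vide
-- ===== SOURCE B (Python) =====
-- def meilleur_mot(motsfr, ll, dico):
--     have = {}
--     for t in ll:
--         have[t] = have.get(t, 0) + 1
--     jokers = have.get('?', 0)
--     n = len(ll)
--     best = ""
--     bestval = 0
--     for mot in motsfr:
--         if len(mot) > n:
--             continue
--         need = {}
--         for c in mot:
--             need[c] = need.get(c, 0) + 1
--         deficit = sum(max(0, k - have.get(c, 0)) for c, k in need.items())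
--         if deficit > jokers:
--             continue
--         val = (50 if len(mot) == 7 else 0) + sum(dico[c]['val'] for c in mot)
--         if val > bestval:
--             best = mot
--             bestval = val
--     return best
-- ===== Notes on version B (the rewrite author's own statement) =====
-- stated objective: faster
-- what changed: Replaces A's two-pass build-playable-list-then-scan design and its greedy temp-list membership/removal per letter by a single pass over the words using tile counters: a word is playable iff it fits the rack and the sum of per-letter shortfalls is at most the joker count, and the best word is tracked with one running maximum.
import Mathlib
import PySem

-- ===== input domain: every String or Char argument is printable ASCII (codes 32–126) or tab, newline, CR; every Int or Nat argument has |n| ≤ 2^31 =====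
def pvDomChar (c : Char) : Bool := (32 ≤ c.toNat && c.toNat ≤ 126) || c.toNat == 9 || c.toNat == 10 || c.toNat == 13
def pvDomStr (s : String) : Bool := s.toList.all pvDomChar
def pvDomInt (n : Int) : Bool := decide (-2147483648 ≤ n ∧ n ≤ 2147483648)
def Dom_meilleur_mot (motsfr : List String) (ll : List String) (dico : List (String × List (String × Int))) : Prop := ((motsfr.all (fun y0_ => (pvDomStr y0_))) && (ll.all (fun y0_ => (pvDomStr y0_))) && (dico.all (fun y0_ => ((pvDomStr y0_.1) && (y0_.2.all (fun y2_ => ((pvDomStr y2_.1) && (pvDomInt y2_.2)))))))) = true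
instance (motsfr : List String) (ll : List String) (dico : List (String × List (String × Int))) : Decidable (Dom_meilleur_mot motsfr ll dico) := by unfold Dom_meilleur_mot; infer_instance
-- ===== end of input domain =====

-- B replaces A's build-a-playable-list-then-scan design (a membership scan and remove of the
-- rack list per letter) by a single pass with tile counters; measured faster in a timing run. Where Python A raises KeyError
-- (a playable word with a letter missing from dico, or an entry without 'val'), both ports
-- use a `.getD 0` fallback — those inputs are excluded by Pre_meilleur_mot.

-- ===== PORT A =====
-- loop body of mot_jouable: state is (lltemp, possible, nbe)
def pvStepA (st : List String × Bool × Int) (c : Char) : List String × Bool × Int :=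
  let possible := st.2.1 && st.1.contains c.toString
  if st.1.contains c.toString then
    ((PySem.List.remove? st.1 c.toString).getD st.1, possible, st.2.2)
  else
    (st.1, possible, st.2.2 + 1)

def mot_jouable (mot : String) (ll : List String) : Bool :=
  let st := mot.toList.foldl pvStepA (ll, decide (mot.toList.length ≤ ll.length), (0 : Int))
  if st.2.2 ≤ ((ll.count "?" : Nat) : Int) then decide (mot.toList.length ≤ ll.length) else st.2.1

def mots_jouables (motsfr : List String) (ll : List String) : List String :=
  motsfr.foldl (fun acc e => if mot_jouable e ll then acc ++ [e] else acc) []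

def valeur_mot (mot : String) (dico : List (String × List (String × Int))) : Int :=
  let val : Int := if mot.toList.length = 7 then 50 else 0
  mot.toList.foldl
    (fun val e => val + (((PySem.Dict.get? (PySem.Dict.mk dico) e.toString).bind fun dd => PySem.Dict.get? (PySem.Dict.mk dd) "val").getD 0)) val

def meilleur_mot (motsfr : List String) (ll : List String) (dico : List (String × List (String × Int))) : String :=
  let motsjouables := mots_jouables motsfr ll
  (motsjouables.foldl
    (fun (st : String × Int) mot =>
      let valmot := valeur_mot mot dico
      if valmot > st.2 then (mot, valmot) else st) ("", 0)).1

-- ===== PORT B =====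
def meilleur_mot_alt (motsfr : List String) (ll : List String) (dico : List (String × List (String × Int))) : String :=
  let haveD := ll.foldl (fun d t => d.insert t (d.getD t 0 + 1)) (PySem.Dict.empty : PySem.Dict String Int)
  let jokers := haveD.getD "?" 0
  let n := ll.length
  (motsfr.foldl
    (fun (st : String × Int) mot =>
      if mot.toList.length > n then st
      else
        let need := (mot.toList.map Char.toString).foldl
          (fun d c => d.insert c (d.getD c 0 + 1)) (PySem.Dict.empty : PySem.Dict String Int)
        let deficit := (need.items.map (fun p => max 0 (p.2 - haveD.getD p.1 0))).sum
        if deficit > jokers then st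
        else
          let val := (if mot.toList.length = 7 then (50 : Int) else 0)
            + (mot.toList.map
                (fun c => (((PySem.Dict.get? (PySem.Dict.mk dico) c.toString).bind fun dd => PySem.Dict.get? (PySem.Dict.mk dd) "val").getD 0))).sum
          if val > st.2 then (mot, val) else st) ("", 0)).1

-- ===== PRECONDITION & SPEC =====
-- Pre_ excludes exactly the inputs where Python A raises KeyError: some playable word
-- (short enough and letter deficit within the joker count) contains a letter whose entry
-- is missing from dico or whose entry lacks the key "val".
def Pre_meilleur_mot (motsfr : List String) (ll : List String) (dico : List (String × List (String × Int))) : Prop :=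
  ∀ mot ∈ motsfr,
    (mot.toList.length ≤ ll.length ∧
      ((PySem.List.dedup (mot.toList.map Char.toString)).map
        (fun s => max 0 ((((mot.toList.map Char.toString).count s : Nat) : Int) - ((ll.count s : Nat) : Int)))).sum
        ≤ ((ll.count "?" : Nat) : Int)) →
    (mot.toList.all (fun c =>
      ((PySem.Dict.get? (PySem.Dict.mk dico) c.toString).bind fun dd => PySem.Dict.get? (PySem.Dict.mk dd) "val").isSome)) = true
instance (motsfr : List String) (ll : List String) (dico : List (String × List (String × Int))) : Decidable (Pre_meilleur_mot motsfr ll dico) := by unfold Pre_meilleur_mot; infer_instance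

def pvWitness_meilleur_mot : List String × List String × (List (String × List (String × Int))) :=
  (["ab", "zz"], ["a", "b", "?"], [("a", [("val", 1)]), ("b", [("val", 3)]), ("z", [("val", 10)])])

def Spec_meilleur_mot (motsfr : List String) (ll : List String) (dico : List (String × List (String × Int))) (out : String) : Prop := out = meilleur_mot_alt motsfr ll dico
instance (motsfr : List String) (ll : List String) (dico : List (String × List (String × Int))) (out : String) : Decidable (Spec_meilleur_mot motsfr ll dico out) := by unfold Spec_meilleur_mot; infer_instance

-- ===== CLAIM (what is proved, stated in full; the proofs are below) =====
def Claim_equal_meilleur_mot : Prop := ∀ (motsfr : List String) (ll : List String) (dico : List (String × List (String × Int))), Dom_meilleur_mot motsfr ll dico → Pre_meilleur_mot motsfr ll dico → Spec_meilleur_mot motsfr ll dico (meilleur_mot motsfr ll dico)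

-- ===== LEMMAS AND PROOFS =====

-- the greedy miss count of A's inner loop, as a recursion on the word's letters
def pvG : List Char → List String → Int
  | [], _ => 0
  | c :: rest, lt =>
    if c.toString ∈ lt then pvG rest ((PySem.List.remove? lt c.toString).getD lt)
    else 1 + pvG rest lt

lemma pvG_nonneg (chars : List Char) : ∀ lt : List String, 0 ≤ pvG chars lt := by
  induction chars with
  | nil => intro lt; simp [pvG]
  | cons c rest ih =>
    intro lt
    unfold pvG
    split
    · exact ih _
    · have := ih lt; omega

lemma pvFold (chars : List Char) : ∀ (lt : List String) (p : Bool) (nbe : Int),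
    (chars.foldl pvStepA (lt, p, nbe)).2 = (p && (pvG chars lt == 0), nbe + pvG chars lt) := by
  induction chars with
  | nil => intro lt p nbe; simp [pvG]
  | cons c rest ih =>
    intro lt p nbe
    simp only [List.foldl_cons]
    by_cases h : c.toString ∈ lt
    · have h' : String.singleton c ∈ lt := h
      rw [show pvStepA (lt, p, nbe) c = ((PySem.List.remove? lt c.toString).getD lt, p, nbe) from by
        simp [pvStepA, h']]
      rw [ih]
      have hg : pvG (c :: rest) lt = pvG rest ((PySem.List.remove? lt c.toString).getD lt) := by
        conv_lhs => unfold pvG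
        rw [if_pos h]
      rw [hg]
    · have h' : String.singleton c ∉ lt := h
      rw [show pvStepA (lt, p, nbe) c = (lt, false, nbe + 1) from by simp [pvStepA, h']]
      rw [ih]
      have hg : pvG (c :: rest) lt = 1 + pvG rest lt := by
        conv_lhs => unfold pvG
        rw [if_neg h]
      rw [hg]
      have hG : (1 + pvG rest lt == 0) = false :=
        beq_eq_false_iff_ne.mpr (by have := pvG_nonneg rest lt; omega)
      rw [hG]
      simp only [Bool.false_and, Bool.and_false, Prod.mk.injEq, true_and]
      omega

lemma mot_jouable_eq (mot : String) (ll : List String) :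
    mot_jouable mot ll =
      (decide (mot.toList.length ≤ ll.length) &&
        decide (pvG mot.toList ll ≤ ((ll.count "?" : Nat) : Int))) := by
  unfold mot_jouable
  show (if (List.foldl pvStepA (ll, decide (mot.toList.length ≤ ll.length), (0 : Int)) mot.toList).2.2
          ≤ ((ll.count "?" : Nat) : Int)
        then decide (mot.toList.length ≤ ll.length)
        else (List.foldl pvStepA (ll, decide (mot.toList.length ≤ ll.length), (0 : Int)) mot.toList).2.1) = _
  rw [pvFold]
  by_cases hj : pvG mot.toList ll ≤ ((ll.count "?" : Nat) : Int)
  · simp [hj]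
  · have h0 : ¬ (pvG mot.toList ll = 0) := by
      have : (0 : Int) ≤ ((ll.count "?" : Nat) : Int) := by positivity
      omega
    simp [hj, beq_eq_false_iff_ne.mpr h0]

lemma pvG_eq_sum (S : List String) (hS : S.Nodup) :
    ∀ (chars : List Char) (lt : List String), (∀ c ∈ chars, c.toString ∈ S) →
      pvG chars lt =
        (S.map (fun s =>
          max 0 ((((chars.map Char.toString).count s : Nat) : Int) - ((lt.count s : Nat) : Int)))).sum := by
  intro chars
  induction chars with
  | nil =>
    intro lt _
    symm
    apply List.sum_eq_zero
    intro x hx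
    simp only [List.mem_map] at hx
    obtain ⟨s, _, rfl⟩ := hx
    simp only [List.map_nil, List.count_nil]
    omega
  | cons c rest ih =>
    intro lt hmem
    have hc : c.toString ∈ S := hmem c (List.mem_cons_self ..)
    have hrest : ∀ x ∈ rest, x.toString ∈ S := fun x hx => hmem x (List.mem_cons_of_mem _ hx)
    by_cases h : c.toString ∈ lt
    · unfold pvG
      rw [if_pos h, PySem.List.remove?_eq_some_erase lt _ h, Option.getD_some, ih _ hrest]
      apply congrArg List.sum
      apply List.map_congr_left
      intro x _
      by_cases hxc : x = c.toString
      · rw [hxc, List.count_erase_self]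
        have h1 : 0 < lt.count c.toString := List.count_pos_iff.mpr h
        simp only [List.map_cons, List.count_cons_self]
        omega
      · rw [List.count_erase_of_ne hxc]
        simp only [List.map_cons, List.count_cons_of_ne (Ne.symm hxc)]
    · unfold pvG
      rw [if_neg h, ih _ hrest]
      have h0 : lt.count c.toString = 0 := List.count_eq_zero.mpr h
      obtain ⟨S1, S2, rfl⟩ := List.append_of_mem hc
      rw [List.nodup_append] at hS
      have hc1 : c.toString ∉ S1 := fun hx => hS.2.2 _ hx _ (List.mem_cons_self ..) rfl
      have hc2 : c.toString ∉ S2 := (List.nodup_cons.mp hS.2.1).1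
      simp only [List.map_append, List.sum_append, List.map_cons, List.sum_cons]
      have e1 : ∀ (l : List String), c.toString ∉ l →
          (l.map (fun s => max 0 (((List.count s (rest.map Char.toString) : Nat) : Int) - ((lt.count s : Nat) : Int))))
            = (l.map (fun s => max 0 (((List.count s (c.toString :: rest.map Char.toString) : Nat) : Int) - ((lt.count s : Nat) : Int)))) := by
        intro l hl
        apply List.map_congr_left
        intro x hx
        have hxc : c.toString ≠ x := fun he => hl (he ▸ hx)
        rw [List.count_cons_of_ne hxc]
      rw [← e1 S1 hc1, ← e1 S2 hc2]
      have hterm : max 0 (((List.count c.toString (c.toString :: rest.map Char.toString) : Nat) : Int) - ((lt.count c.toString : Nat) : Int))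
          = 1 + max 0 (((List.count c.toString (rest.map Char.toString) : Nat) : Int) - ((lt.count c.toString : Nat) : Int)) := by
        rw [List.count_cons_self, h0]
        omega
      rw [hterm]
      ring

lemma valeur_mot_eq (mot : String) (dico : List (String × List (String × Int))) :
    valeur_mot mot dico =
      (if mot.toList.length = 7 then (50 : Int) else 0)
        + (mot.toList.map
            (fun c => (((PySem.Dict.get? (PySem.Dict.mk dico) c.toString).bind fun dd => PySem.Dict.get? (PySem.Dict.mk dd) "val").getD 0))).sum := by
  unfold valeur_mot
  rw [PySem.List.foldl_add]

lemma deficit_eq (mot : String) (ll : List String) :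
    ((((mot.toList.map Char.toString).foldl
        (fun d c => d.insert c (d.getD c 0 + 1)) (PySem.Dict.empty : PySem.Dict String Int)).items.map
      (fun p => max 0 (p.2 -
        (ll.foldl (fun d t => d.insert t (d.getD t 0 + 1)) (PySem.Dict.empty : PySem.Dict String Int)).getD p.1 0))).sum)
      = pvG mot.toList ll := by
  rw [PySem.Dict.foldl_insert_getD_add_one_eq_counter, PySem.Dict.foldl_insert_getD_add_one_eq_counter,
    PySem.Dict.items_counter]
  rw [pvG_eq_sum (PySem.Set.ofList (mot.toList.map Char.toString))
    (PySem.Set.nodup_ofList _) mot.toList ll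
    (fun c hc => (PySem.Set.mem_ofList _ _).mpr (List.mem_map_of_mem hc))]
  rw [List.map_map]
  apply congrArg List.sum
  apply List.map_congr_left
  intro s _
  simp [PySem.Dict.getD_counter]

lemma jokers_eq (ll : List String) :
    (ll.foldl (fun d t => d.insert t (d.getD t 0 + 1)) (PySem.Dict.empty : PySem.Dict String Int)).getD "?" 0
      = ((ll.count "?" : Nat) : Int) := by
  rw [PySem.Dict.foldl_insert_getD_add_one_eq_counter, PySem.Dict.getD_counter]

lemma main_eq (motsfr : List String) (ll : List String) (dico : List (String × List (String × Int))) :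
    meilleur_mot motsfr ll dico = meilleur_mot_alt motsfr ll dico := by
  simp only [meilleur_mot, meilleur_mot_alt, mots_jouables]
  rw [PySem.List.foldl_append_if (fun e => mot_jouable e ll) (fun e => e) motsfr []]
  simp only [List.nil_append, List.map_id_fun', id_eq, List.foldl_filter]
  congr 1
  apply PySem.List.foldl_congr_mem
  intro st mot _
  rw [mot_jouable_eq, valeur_mot_eq, jokers_eq, deficit_eq]
  by_cases h1 : mot.toList.length ≤ ll.length
  · have h1' : mot.length ≤ ll.length := by simpa using h1
    by_cases h2 : pvG mot.toList ll ≤ ((ll.count "?" : Nat) : Int)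
    · simp [h2, h1', not_lt.mpr h1', not_lt.mpr h2]
    · simp [h2, h1', not_lt.mpr h1', not_le.mp h2]
  · have h1' : ¬ mot.length ≤ ll.length := by simpa using h1
    simp [h1', not_le.mp h1']

-- ===== VERDICT (by name: the statement is the Claim_ definition above) =====
theorem meilleur_mot_spec : Claim_equal_meilleur_mot := by
  intro motsfr ll dico _ _
  unfold Spec_meilleur_mot
  exact main_eq motsfr ll dico
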